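-- pv_equiv track=rewrite | github.com/nobu1474/KDA | benchmark_realdata_facets.py | old_get_facets
-- ===== SOURCE A (Python) =====
-- def old_get_facets(simplices, dimension=None):
--     candidate_by_dim = {
--         dim: list(simplices.get(dim, []))
--         for dim in sorted(simplices.keys(), reverse=True)
--     }
--     higher_facet_sets = []
--     facets_by_dim = {}
--
--     for dim in sorted(candidate_by_dim.keys(), reverse=True):
--         current_candidates = candidate_by_dim[dim]
--         if not current_candidates:
--             continue
--
--         remaining = []
--         for simplex in current_candidates:
--             simplex_set = set(simplex)
--             if not any(simplex_set.issubset(higher_facet) for higher_facet in higher_facet_sets):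
--                 remaining.append(simplex)
--
--         facets_by_dim[dim] = remaining
--         higher_facet_sets.extend(set(simplex) for simplex in remaining)
--
--     facets = []
--     for dim in sorted(facets_by_dim.keys(), reverse=True):
--         facets.extend(facets_by_dim[dim])
--
--     if dimension is None:
--         return facets
--
--     target_size = int(dimension) + 1
--     return [facet for facet in facets if len(facet) == target_size]
-- ===== SOURCE B (Python) =====
-- def old_get_facets(simplices, dimension=None):
--     # Flat one-pass formulation: a simplex is a facet iff no simplex of a
--     # strictly higher dimension is a superset of it (subset-transitivity makes
--     # comparing against all higher candidates equal to comparing against kept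
--     # higher facets).  Vertex sets are computed once, up front.
--     entries = [(dim, simplex, set(simplex))
--                for dim in sorted(simplices, reverse=True)
--                for simplex in simplices.get(dim, [])]
--     facets = [s for (d, s, ss) in entries
--               if not any(d < d2 and ss <= ss2 for (d2, _, ss2) in entries)]
--     if dimension is None:
--         return facets
--     return [f for f in facets if len(f) == int(dimension) + 1]
-- ===== Notes on version B (the rewrite author's own statement) =====
-- stated objective: simpler
-- what changed: Replaced A's incremental higher_facet_sets accumulator, per-dimension remaining lists, facets_by_dim dict and second assembly pass by one flat list of (dim, simplex) entries filtered by a single direct criterion: keep a simplex iff no strictly-higher-dimension simplex is a superset (correct by subset-transitivity).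
import Mathlib
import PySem

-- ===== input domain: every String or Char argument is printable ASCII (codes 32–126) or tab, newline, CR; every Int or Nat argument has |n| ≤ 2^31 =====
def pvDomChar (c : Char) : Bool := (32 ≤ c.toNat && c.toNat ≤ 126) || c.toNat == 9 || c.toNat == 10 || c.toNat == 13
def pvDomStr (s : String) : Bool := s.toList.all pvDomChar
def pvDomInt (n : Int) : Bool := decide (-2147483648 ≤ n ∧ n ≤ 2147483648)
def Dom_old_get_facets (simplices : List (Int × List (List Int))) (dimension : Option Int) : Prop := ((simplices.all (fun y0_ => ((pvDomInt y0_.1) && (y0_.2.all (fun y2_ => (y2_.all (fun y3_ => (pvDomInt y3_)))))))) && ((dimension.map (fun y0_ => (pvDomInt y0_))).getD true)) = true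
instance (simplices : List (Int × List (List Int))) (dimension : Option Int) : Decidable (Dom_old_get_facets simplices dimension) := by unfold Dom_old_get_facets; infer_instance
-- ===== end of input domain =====

-- B replaces A's incremental kept-facet accumulator and dim-grouped passes by one flat
-- filtered list of (dim, simplex) entries ("keep iff no strictly-higher simplex is a
-- superset"); objective: simpler.

-- ===== PORT A =====
def old_get_facets (simplices : List (Int × List (List Int))) (dimension : Option Int) : List (List Int) :=
  let d := PySem.Dict.ofList simplices
  let candidate_by_dim : PySem.Dict Int (List (List Int)) :=
    (PySem.List.sorted d.keys (fun x => x) true).foldl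
      (fun acc dim => acc.insert dim (d.getD dim [])) PySem.Dict.empty
  let st :=
    (PySem.List.sorted candidate_by_dim.keys (fun x => x) true).foldl
      (fun (st : List (PySem.Set Int) × PySem.Dict Int (List (List Int))) dim =>
        let current_candidates := candidate_by_dim.getD dim []
        if current_candidates = [] then st
        else
          let remaining := current_candidates.foldl
            (fun rem simplex =>
              if !(st.1.any (fun h => PySem.Set.issubset (PySem.Set.ofList simplex) h))
              then rem ++ [simplex] else rem) []
          (st.1 ++ remaining.map (fun s => PySem.Set.ofList s), st.2.insert dim remaining))
      ([], PySem.Dict.empty)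
  let facets :=
    (PySem.List.sorted st.2.keys (fun x => x) true).foldl
      (fun acc dim => acc ++ st.2.getD dim []) []
  match dimension with
  | none => facets
  | some dv => facets.filter (fun f => decide ((f.length : Int) = dv + 1))

-- ===== PORT B =====
def old_get_facets_alt (simplices : List (Int × List (List Int))) (dimension : Option Int) : List (List Int) :=
  let d := PySem.Dict.ofList simplices
  let entries : List (Int × List Int × PySem.Set Int) :=
    (PySem.List.sorted d.keys (fun x => x) true).flatMap
      (fun dim => (d.getD dim []).map (fun s => (dim, s, PySem.Set.ofList s)))
  let facets := (entries.filter (fun p =>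
      ! entries.any (fun q =>
          decide (p.1 < q.1) && PySem.Set.issubset p.2.2 q.2.2))).map
      (fun p => p.2.1)
  match dimension with
  | none => facets
  | some dv => facets.filter (fun f => decide ((f.length : Int) = dv + 1))

-- ===== PRECONDITION & SPEC =====
def Spec_old_get_facets (simplices : List (Int × List (List Int))) (dimension : Option Int) (out : List (List Int)) : Prop := out = old_get_facets_alt simplices dimension
instance (simplices : List (Int × List (List Int))) (dimension : Option Int) (out : List (List Int)) : Decidable (Spec_old_get_facets simplices dimension out) := by unfold Spec_old_get_facets; infer_instance

-- ===== CLAIM (what is proved, stated in full; the proofs are below) =====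
def Claim_equal_old_get_facets : Prop := ∀ (simplices : List (Int × List (List Int))) (dimension : Option Int), Dom_old_get_facets simplices dimension → Spec_old_get_facets simplices dimension (old_get_facets simplices dimension)

-- ===== LEMMAS AND PROOFS =====

-- subset test on raw simplices (set(s) <= set(t))
def pvSub (s t : List Int) : Bool :=
  PySem.Set.issubset (PySem.Set.ofList s) (PySem.Set.ofList t)

-- the kept ("remaining") simplices of one dimension, given the higher kept facet sets H
def pvRem (H : List (PySem.Set Int)) (cur : List (List Int)) : List (List Int) :=
  cur.filter (fun t => ! H.any (fun h => PySem.Set.issubset (PySem.Set.ofList t) h))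

-- all kept simplices for the dims list, threading the accumulator H (A's algorithm, abstractly)
def pvRemAux (c : PySem.Dict Int (List (List Int))) : List Int → List (PySem.Set Int) → List (List Int)
  | [], _ => []
  | dim :: rest, H =>
    let rem := pvRem H (c.getD dim [])
    rem ++ pvRemAux c rest (H ++ rem.map (fun s => PySem.Set.ofList s))

-- A's facets_by_dim as an items list (skipping empty candidate lists)
def pvLayers (c : PySem.Dict Int (List (List Int))) : List Int → List (PySem.Set Int) → List (Int × List (List Int))
  | [], _ => []
  | dim :: rest, H =>
    let cur := c.getD dim []
    if cur = [] then pvLayers c rest H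
    else
      let rem := pvRem H cur
      (dim, rem) :: pvLayers c rest (H ++ rem.map (fun s => PySem.Set.ofList s))

-- B's flat entries list
def pvEntries (c : PySem.Dict Int (List (List Int))) (dims : List Int) : List (Int × List Int) :=
  dims.flatMap (fun dim => (c.getD dim []).map (fun s => (dim, s)))

theorem pvSub_trans {a b : List Int} {hc : PySem.Set Int} (h1 : pvSub a b = true)
    (h2 : PySem.Set.issubset (PySem.Set.ofList b) hc = true) :
    PySem.Set.issubset (PySem.Set.ofList a) hc = true := by
  unfold pvSub at h1
  rw [PySem.Set.issubset_iff] at h1 h2 ⊢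
  intro x hx; exact h2 _ (h1 _ hx)

theorem pvCoverStep (H : List (PySem.Set Int)) (cur : List (List Int)) (s : List Int) :
    (H.any (fun h => PySem.Set.issubset (PySem.Set.ofList s) h)
      || (pvRem H cur).any (fun t => pvSub s t))
    = (H.any (fun h => PySem.Set.issubset (PySem.Set.ofList s) h)
      || cur.any (fun t => pvSub s t)) := by
  cases hH : H.any (fun h => PySem.Set.issubset (PySem.Set.ofList s) h) with
  | true => simp
  | false =>
    simp only [Bool.false_or]
    cases hc : cur.any (fun t => pvSub s t) with
    | false =>
      simp only [List.any_eq_false] at hc ⊢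
      intro t ht; exact hc t (List.mem_of_mem_filter ht)
    | true =>
      simp only [List.any_eq_true] at hc ⊢
      obtain ⟨t, htc, hst⟩ := hc
      by_cases hrem : (! H.any (fun h => PySem.Set.issubset (PySem.Set.ofList t) h)) = true
      · exact ⟨t, List.mem_filter.mpr ⟨htc, hrem⟩, hst⟩
      · simp only [Bool.not_eq_true', Bool.not_eq_false, List.any_eq_true] at hrem
        obtain ⟨h, hhH, hth⟩ := hrem
        exfalso
        have := pvSub_trans hst hth
        have h2 : H.any (fun h => PySem.Set.issubset (PySem.Set.ofList s) h) = true :=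
          List.any_eq_true.mpr ⟨h, hhH, this⟩
        rw [hH] at h2; exact Bool.noConfusion h2

theorem pvMem_entries_fst {c : PySem.Dict Int (List (List Int))} {dims : List Int}
    {p : Int × List Int} (hp : p ∈ pvEntries c dims) : p.1 ∈ dims := by
  unfold pvEntries at hp
  simp only [List.mem_flatMap, List.mem_map] at hp
  obtain ⟨dim, hdim, s, _, rfl⟩ := hp
  exact hdim

-- B's filter criterion equals A's layered recursion
theorem pvRemAux_eq_filter (c : PySem.Dict Int (List (List Int))) :
    ∀ (dims : List Int), dims.Pairwise (· > ·) → ∀ (H : List (PySem.Set Int)),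
    pvRemAux c dims H =
      ((pvEntries c dims).filter (fun p =>
        (! H.any (fun h => PySem.Set.issubset (PySem.Set.ofList p.2) h))
        && (! (pvEntries c dims).any (fun q => decide (p.1 < q.1) && pvSub p.2 q.2)))).map
        (fun p => p.2) := by
  intro dims
  induction dims with
  | nil => intro _ H; simp [pvRemAux, pvEntries]
  | cons dim rest ih =>
    intro hpw H
    have hlt : ∀ k ∈ rest, k < dim := by
      intro k hk; exact (List.pairwise_cons.mp hpw).1 k hk
    have hpwrest := (List.pairwise_cons.mp hpw).2
    have hE : pvEntries c (dim :: rest)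
        = (c.getD dim []).map (fun s => (dim, s)) ++ pvEntries c rest := by
      simp [pvEntries]
    rw [hE, List.filter_append, List.map_append]
    -- head part: the "strictly higher" disjunct is always false
    have hhead : ((c.getD dim []).map (fun s => (dim, s))).filter (fun p =>
        (! H.any (fun h => PySem.Set.issubset (PySem.Set.ofList p.2) h))
        && (! ((c.getD dim []).map (fun s => (dim, s)) ++ pvEntries c rest).any
              (fun q => decide (p.1 < q.1) && pvSub p.2 q.2)))
        = (pvRem H (c.getD dim [])).map (fun s => (dim, s)) := by
      rw [List.filter_map]
      unfold pvRem
      congr 1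
      apply List.filter_congr
      intro s _
      simp only [Function.comp]
      have hany : ((c.getD dim []).map (fun t => (dim, t)) ++ pvEntries c rest).any
          (fun q => decide ((dim, s).1 < q.1) && pvSub (dim, s).2 q.2) = false := by
        rw [List.any_eq_false]
        intro q hq
        rcases List.mem_append.mp hq with hq1 | hq2
        · obtain ⟨t, _, rfl⟩ := List.mem_map.mp hq1
          simp
        · have : q.1 < dim := hlt _ (pvMem_entries_fst hq2)
          simp only [Bool.and_eq_true, decide_eq_true_eq]
          intro hcon
          omega
      rw [hany]
      simp
    rw [hhead]
    -- tail part: fold the head comparisons into the accumulator via pvCoverStep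
    have htail : (pvEntries c rest).filter (fun p =>
        (! H.any (fun h => PySem.Set.issubset (PySem.Set.ofList p.2) h))
        && (! ((c.getD dim []).map (fun s => (dim, s)) ++ pvEntries c rest).any
              (fun q => decide (p.1 < q.1) && pvSub p.2 q.2)))
        = (pvEntries c rest).filter (fun p =>
        (! (H ++ (pvRem H (c.getD dim [])).map (fun s => PySem.Set.ofList s)).any
              (fun h => PySem.Set.issubset (PySem.Set.ofList p.2) h))
        && (! (pvEntries c rest).any (fun q => decide (p.1 < q.1) && pvSub p.2 q.2))) := by
      apply List.filter_congr
      intro p hp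
      have hp1 : p.1 < dim := hlt _ (pvMem_entries_fst hp)
      have hheadany : ((c.getD dim []).map (fun s => (dim, s))).any
          (fun q => decide (p.1 < q.1) && pvSub p.2 q.2)
          = (c.getD dim []).any (fun t => pvSub p.2 t) := by
        rw [List.any_map]
        apply PySem.List.any_congr_mem
        intro t _
        simp only [Function.comp]
        simp [hp1]
      rw [List.any_append, hheadany, List.any_append, List.any_map]
      have hrm : ((pvRem H (c.getD dim [])).any
          ((fun h => PySem.Set.issubset (PySem.Set.ofList p.2) h) ∘ (fun s => PySem.Set.ofList s)))
          = (pvRem H (c.getD dim [])).any (fun t => pvSub p.2 t) := by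
        apply PySem.List.any_congr_mem; intro t _; rfl
      rw [hrm]
      have hcov := pvCoverStep H (c.getD dim []) p.2
      cases hx : H.any (fun h => PySem.Set.issubset (PySem.Set.ofList p.2) h) with
      | true => simp
      | false =>
        rw [hx] at hcov
        simp only [Bool.false_or] at hcov
        rw [hcov]
        cases (c.getD dim []).any (fun t => pvSub p.2 t) <;>
        cases (pvEntries c rest).any (fun q => decide (p.1 < q.1) && pvSub p.2 q.2) <;> simp
    rw [htail, ← ih hpwrest]
    unfold pvRemAux
    simp only [List.map_map]
    rw [show ((fun p : Int × List Int => p.2) ∘ (fun s : List Int => (dim, s))) = id from rfl, List.map_id]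
    cases rest <;> rfl

-- pvRemAux is the flattened values of pvLayers
theorem pvRemAux_eq_layers (c : PySem.Dict Int (List (List Int))) :
    ∀ (dims : List Int) (H : List (PySem.Set Int)),
    pvRemAux c dims H = (pvLayers c dims H).flatMap (fun p => p.2) := by
  intro dims
  induction dims with
  | nil => intro H; simp [pvRemAux, pvLayers]
  | cons dim rest ih =>
    intro H
    unfold pvRemAux pvLayers
    by_cases hcur : c.getD dim [] = []
    · simp [hcur, pvRem, ih]
    · rw [if_neg hcur, List.flatMap_cons]
      exact congrArg (fun z => pvRem H (c.getD dim []) ++ z) (ih _)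

-- layer keys form a sublist of dims
theorem pvLayers_keys_sublist (c : PySem.Dict Int (List (List Int))) :
    ∀ (dims : List Int) (H : List (PySem.Set Int)),
    ((pvLayers c dims H).map (fun p => p.1)).Sublist dims := by
  intro dims
  induction dims with
  | nil => intro H; simp [pvLayers]
  | cons dim rest ih =>
    intro H
    unfold pvLayers
    by_cases hcur : c.getD dim [] = []
    · rw [if_pos hcur]
      exact (ih H).cons dim
    · simp only [if_neg hcur, List.map_cons]
      exact (ih _).cons₂ dim

-- A's main fold, characterised
theorem pvFoldA (c : PySem.Dict Int (List (List Int))) :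
    ∀ (dims : List Int), dims.Nodup →
    ∀ (H : List (PySem.Set Int)) (fb : PySem.Dict Int (List (List Int))),
    (∀ k ∈ dims, fb.contains k = false) →
    (dims.foldl
      (fun (st : List (PySem.Set Int) × PySem.Dict Int (List (List Int))) dim =>
        let current_candidates := c.getD dim []
        if current_candidates = [] then st
        else
          let remaining := current_candidates.foldl
            (fun rem simplex =>
              if !(st.1.any (fun h => PySem.Set.issubset (PySem.Set.ofList simplex) h))
              then rem ++ [simplex] else rem) []
          (st.1 ++ remaining.map (fun s => PySem.Set.ofList s), st.2.insert dim remaining))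
      (H, fb)).2.items = fb.items ++ pvLayers c dims H := by
  intro dims
  induction dims with
  | nil => intro _ H fb _; simp [pvLayers]
  | cons dim rest ih =>
    intro hnd H fb hfb
    have hndrest := (List.nodup_cons.mp hnd).2
    have hdimrest := (List.nodup_cons.mp hnd).1
    rw [List.foldl_cons]
    simp only
    by_cases hcur : c.getD dim [] = []
    · rw [if_pos hcur]
      unfold pvLayers
      rw [if_pos hcur]
      exact ih hndrest H fb (fun k hk => hfb k (List.mem_cons_of_mem _ hk))
    · rw [if_neg hcur]
      have hrem : (c.getD dim []).foldl
          (fun rem simplex =>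
            if !(H.any (fun h => PySem.Set.issubset (PySem.Set.ofList simplex) h))
            then rem ++ [simplex] else rem) []
          = pvRem H (c.getD dim []) := by
        rw [PySem.List.foldl_append_if_eq_filter]
        rfl
      rw [hrem]
      unfold pvLayers
      rw [if_neg hcur]
      rw [ih hndrest _ (fb.insert dim (pvRem H (c.getD dim []))) (by
        intro k hk
        rw [PySem.Dict.contains_insert]
        have : k ≠ dim := fun h => hdimrest (h ▸ hk)
        simp [this, hfb k (List.mem_cons_of_mem _ hk)])]
      rw [PySem.Dict.items_insert_of_not_contains (d := fb) (h := hfb dim (List.mem_cons_self))]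
      simp

-- flatMap of getD over the keys of a nodup-keyed items list is the concatenation of values
theorem pvFlatMapKeys (fb : PySem.Dict Int (List (List Int))) :
    ∀ (es : List (Int × List (List Int))),
    (∀ p ∈ es, fb.getD p.1 [] = p.2) →
    (es.map (fun p => p.1)).flatMap (fun k => fb.getD k []) = es.flatMap (fun p => p.2) := by
  intro es
  induction es with
  | nil => intro _; simp
  | cons p rest ih =>
    intro h
    simp only [List.map_cons, List.flatMap_cons]
    rw [h p List.mem_cons_self, ih (fun q hq => h q (List.mem_cons_of_mem _ hq))]

theorem pvGt_of_ge_nodup : ∀ (l : List Int), l.Pairwise (· ≥ ·) → l.Nodup → l.Pairwise (· > ·) := by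
  intro l hge hnd
  refine (hge.and hnd).imp ?_
  intro a b h
  exact lt_of_le_of_ne h.1 (Ne.symm h.2)

-- flatMap over nodup keys of a dict equals the concatenation of its values
theorem pvExtract (fb : PySem.Dict Int (List (List Int))) (hnd : fb.keys.Nodup) :
    fb.keys.flatMap (fun k => fb.getD k []) = fb.items.flatMap (fun p => p.2) := by
  have h := pvFlatMapKeys fb fb.items (fun p hp => by
    have : (p.1, p.2) ∈ fb.items := by simpa using hp
    exact PySem.Dict.getD_of_mem_items fb this hnd [])
  simpa only [PySem.Dict.keys] using h

-- ===== VERDICT (by name: the statement is the Claim_ definition above) =====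
theorem old_get_facets_spec : Claim_equal_old_get_facets := by
  unfold Claim_equal_old_get_facets
  intro simplices dimension _
  unfold Spec_old_get_facets old_get_facets old_get_facets_alt
  dsimp only
  have hnk : (PySem.Dict.ofList simplices).keys.Nodup := PySem.Dict.nodup_keys_ofList _
  generalize hd : PySem.Dict.ofList simplices = d at *
  set dims := PySem.List.sorted d.keys (fun x => x) true with hdims
  have hperm : dims.Perm d.keys := PySem.List.sorted_perm d.keys (fun x => x) true
  have hdimsnodup : dims.Nodup := hperm.nodup_iff.mpr hnk
  have hge : dims.Pairwise (fun a b => b ≤ a) := PySem.List.sorted_pairwise_rev d.keys (fun x => x)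
  have hgt : dims.Pairwise (· > ·) := pvGt_of_ge_nodup dims hge hdimsnodup
  set c := dims.foldl (fun acc dim => acc.insert dim (d.getD dim [])) PySem.Dict.empty with hc
  have hcand_items : c.items = dims.map (fun a => (a, d.getD a [])) := by
    rw [hc]
    have h := PySem.Dict.items_foldl_insert_fresh dims (fun x => x) (fun a => d.getD a [])
      PySem.Dict.empty (by intro a _; exact PySem.Dict.contains_empty _) (by simpa using hdimsnodup)
    simpa using h
  have hckeys : c.keys = dims := by
    show c.items.map Prod.fst = dims
    rw [hcand_items]
    simp [Function.comp_def]
  have hcnodup : c.keys.Nodup := hckeys ▸ hdimsnodup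
  have hsorted2 : PySem.List.sorted c.keys (fun x => x) true = dims := by
    rw [hckeys]; exact PySem.List.sorted_rev_eq_self_of_pairwise _ _ hge
  have hcget : ∀ k, c.getD k [] = d.getD k [] := by
    intro k
    by_cases hk : k ∈ dims
    · exact PySem.Dict.getD_of_mem_items c (by
        rw [hcand_items]; exact List.mem_map.mpr ⟨k, hk, rfl⟩) hcnodup []
    · have h1 : c.contains k = false := by
        rw [PySem.Dict.contains_eq_decide_mem_keys, hckeys]; simp [hk]
      have h2 : d.contains k = false := by
        rw [PySem.Dict.contains_eq_decide_mem_keys]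
        have : k ∉ d.keys := fun hm => hk (hperm.mem_iff.mpr hm)
        simp [this]
      rw [PySem.Dict.getD_of_not_contains c [] h1, PySem.Dict.getD_of_not_contains d [] h2]
  rw [hsorted2]
  set st := dims.foldl
      (fun (st : List (PySem.Set Int) × PySem.Dict Int (List (List Int))) dim =>
        let current_candidates := c.getD dim []
        if current_candidates = [] then st
        else
          let remaining := current_candidates.foldl
            (fun rem simplex =>
              if !(st.1.any (fun h => PySem.Set.issubset (PySem.Set.ofList simplex) h))
              then rem ++ [simplex] else rem) []
          (st.1 ++ remaining.map (fun s => PySem.Set.ofList s), st.2.insert dim remaining))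
      ([], PySem.Dict.empty) with hst
  have hst2 : st.2.items = pvLayers c dims [] := by
    rw [hst]
    have := pvFoldA c dims hdimsnodup [] PySem.Dict.empty (by
      intro k _; exact PySem.Dict.contains_empty _)
    simpa using this
  have hkeys2 : st.2.keys = (pvLayers c dims []).map (fun p => p.1) := by
    simp only [PySem.Dict.keys, hst2]
  have hsubl : ((pvLayers c dims []).map (fun p => p.1)).Sublist dims :=
    pvLayers_keys_sublist c dims []
  have hgt2 : ((pvLayers c dims []).map (fun p => p.1)).Pairwise (· > ·) := hgt.sublist hsubl
  have hge2 : ((pvLayers c dims []).map (fun p => p.1)).Pairwise (fun a b => b ≤ a) :=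
    hgt2.imp le_of_lt
  have hnd2 : st.2.keys.Nodup := by rw [hkeys2]; exact hdimsnodup.sublist hsubl
  have hsorted3 : PySem.List.sorted st.2.keys (fun x => x) true = st.2.keys := by
    rw [hkeys2]; exact PySem.List.sorted_rev_eq_self_of_pairwise _ _ hge2
  have hfacetsA : (PySem.List.sorted st.2.keys (fun x => x) true).foldl
      (fun acc k => acc ++ st.2.getD k []) [] = pvRemAux c dims [] := by
    rw [hsorted3, PySem.List.foldl_append_eq_flatMap, List.nil_append,
      pvExtract st.2 hnd2, hst2, ← pvRemAux_eq_layers]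

  rw [hfacetsA]
  have hfacetsB := pvRemAux_eq_filter c dims hgt []
  simp only [List.any_nil, Bool.not_false, Bool.true_and] at hfacetsB
  have hent : pvEntries c dims = dims.flatMap (fun dim => (d.getD dim []).map (fun s => (dim, s))) := by
    unfold pvEntries
    simp only [hcget]
  rw [hent] at hfacetsB
  simp only [pvSub] at hfacetsB
  have hmap : (dims.flatMap (fun dim => (d.getD dim []).map (fun s => (dim, s, PySem.Set.ofList s))))
      = (dims.flatMap (fun dim => (d.getD dim []).map (fun s => (dim, s)))).map
          (fun p => (p.1, p.2, PySem.Set.ofList p.2)) := by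
    rw [List.map_flatMap]
    simp [List.map_map, Function.comp_def]
  rw [hfacetsB, hmap]
  simp only [List.filter_map, List.map_map, List.any_map, Function.comp_def]
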